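-- pv_equiv track=rewrite | github.com/marcosgabrielms/GRADUACAO-ADS-IFPI | Algoritmos/Listas-Fabio/Lista-F/Questao-13.py | encontrar_menor
-- ===== SOURCE A (Python) =====
-- def encontrar_menor(numeros, indice=0, menor=None):
--     if menor is None:
--         menor = numeros[0]
--
--     if indice == len(numeros):
--         return menor
--     else:
--         if numeros[indice] < menor:
--             menor = numeros[indice]
--         return encontrar_menor(numeros, indice + 1, menor)
-- ===== SOURCE B (Python) =====
-- def encontrar_menor(numeros, indice=0, menor=None):
--     if menor is None:
--         menor = numeros[0]
--     for i in range(indice, len(numeros)):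
--         if numeros[i] < menor:
--             menor = numeros[i]
--     return menor
-- ===== Notes on version B (the rewrite author's own statement) =====
-- stated objective: idiomatic
-- what changed: Replaces the tail recursion that threads the running minimum through recursive calls with a single iterative for-loop over range(indice, len(numeros)) maintaining the minimum in a local variable.
import Mathlib
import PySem

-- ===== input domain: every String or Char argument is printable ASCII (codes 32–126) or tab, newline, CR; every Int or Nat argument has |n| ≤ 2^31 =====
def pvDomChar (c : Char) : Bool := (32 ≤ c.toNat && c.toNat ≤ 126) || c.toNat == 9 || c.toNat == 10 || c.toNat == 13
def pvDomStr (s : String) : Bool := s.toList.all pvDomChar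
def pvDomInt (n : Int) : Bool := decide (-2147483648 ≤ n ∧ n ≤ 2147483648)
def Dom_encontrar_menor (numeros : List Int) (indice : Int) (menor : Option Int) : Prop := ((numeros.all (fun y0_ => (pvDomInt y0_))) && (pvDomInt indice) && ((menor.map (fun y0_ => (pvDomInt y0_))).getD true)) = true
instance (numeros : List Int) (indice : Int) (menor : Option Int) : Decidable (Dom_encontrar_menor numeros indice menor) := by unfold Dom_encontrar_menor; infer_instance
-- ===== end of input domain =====

-- B replaces A's tail recursion with an iterative for-loop keeping a running minimum (idiomatic; same O(n) cost).

-- ===== PORT A =====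
-- the recursive body of A after 'menor' has been seeded (the 'none' branch is Python's
-- IndexError on numeros[indice], excluded by Pre_)
def encontrarGoA (numeros : List Int) (indice : Int) (menor : Int) : Int :=
  if indice = (numeros.length : Int) then menor
  else
    match h : PySem.List.pyGet? numeros indice with
    | none => menor
    | some v => encontrarGoA numeros (indice + 1) (if v < menor then v else menor)
termination_by ((numeros.length : Int) - indice).toNat
decreasing_by
  have : PySem.List.pyGet? numeros indice ≠ none := by simp [h]
  rw [Ne, PySem.List.pyGet?_eq_none_iff, PySem.Raise.InRange] at this
  omega

def encontrar_menor (numeros : List Int) (indice : Int) (menor : Option Int) : Int :=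
  let m : Int :=
    match menor with
    | none => (PySem.List.pyGet? numeros 0).getD 0   -- numeros[0]; empty list raises, excluded by Pre_
    | some m => m
  encontrarGoA numeros indice m

-- ===== PORT B =====
def encontrar_menor_alt (numeros : List Int) (indice : Int) (menor : Option Int) : Int :=
  let m : Int :=
    match menor with
    | none => (PySem.List.pyGet? numeros 0).getD 0   -- numeros[0]; empty list raises, excluded by Pre_
    | some m => m
  (PySem.List.pyRange indice (numeros.length : Int) 1).foldl
    (fun acc i =>
      match PySem.List.pyGet? numeros i with
      | some v => if v < acc then v else acc
      | none => acc) m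

-- ===== PRECONDITION & SPEC =====
-- Pre_ is exactly where A returns: numeros[0] raises on an empty list when menor is None,
-- and the recursion reaches numeros[indice] with an out-of-range index unless -len ≤ indice ≤ len.
def Pre_encontrar_menor (numeros : List Int) (indice : Int) (menor : Option Int) : Prop :=
  (menor = none → numeros ≠ []) ∧
  -(numeros.length : Int) ≤ indice ∧ indice ≤ (numeros.length : Int)
instance (numeros : List Int) (indice : Int) (menor : Option Int) : Decidable (Pre_encontrar_menor numeros indice menor) := by unfold Pre_encontrar_menor; infer_instance

def pvWitness_encontrar_menor : List Int × Int × Option Int := ([4, 1, 3], 0, none)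

def Spec_encontrar_menor (numeros : List Int) (indice : Int) (menor : Option Int) (out : Int) : Prop := out = encontrar_menor_alt numeros indice menor
instance (numeros : List Int) (indice : Int) (menor : Option Int) (out : Int) : Decidable (Spec_encontrar_menor numeros indice menor out) := by unfold Spec_encontrar_menor; infer_instance

-- ===== CLAIM (what is proved, stated in full; the proofs are below) =====
def Claim_equal_encontrar_menor : Prop := ∀ (numeros : List Int) (indice : Int) (menor : Option Int), Dom_encontrar_menor numeros indice menor → Pre_encontrar_menor numeros indice menor → Spec_encontrar_menor numeros indice menor (encontrar_menor numeros indice menor)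

-- ===== LEMMAS AND PROOFS =====
lemma go_eq_foldl (numeros : List Int) (indice m : Int)
    (h1 : -(numeros.length : Int) ≤ indice) (h2 : indice ≤ (numeros.length : Int)) :
    encontrarGoA numeros indice m =
      (PySem.List.pyRange indice (numeros.length : Int) 1).foldl
        (fun acc i =>
          match PySem.List.pyGet? numeros i with
          | some v => if v < acc then v else acc
          | none => acc) m := by
  by_cases he : indice = (numeros.length : Int)
  · subst he
    rw [encontrarGoA, PySem.List.pyRange_one_eq_nil (le_refl _)]
    simp
  · have hlt : indice < (numeros.length : Int) := lt_of_le_of_ne h2 he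
    obtain ⟨v, hv⟩ : ∃ v, PySem.List.pyGet? numeros indice = some v := by
      cases h : PySem.List.pyGet? numeros indice with
      | none =>
        rw [PySem.List.pyGet?_eq_none_iff, PySem.Raise.InRange] at h
        omega
      | some v => exact ⟨v, rfl⟩
    rw [encontrarGoA]
    simp only [he, if_false]
    rw [PySem.List.pyRange_one_cons hlt, List.foldl_cons, hv]
    exact go_eq_foldl numeros (indice + 1) _ (by omega) (by omega)
termination_by ((numeros.length : Int) - indice).toNat
decreasing_by omega

-- ===== VERDICT (by name: the statement is the Claim_ definition above) =====
theorem encontrar_menor_spec : Claim_equal_encontrar_menor := by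
  intro numeros indice menor _ hpre
  unfold Spec_encontrar_menor encontrar_menor encontrar_menor_alt
  exact go_eq_foldl numeros indice _ hpre.2.1 hpre.2.2
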